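-- pv_equiv track=rewrite | github.com/BryceH-25/ken_french_portfolios | src/calc_industry_portfolios.py | assign_industry
-- ===== SOURCE A (Python) =====
-- def assign_industry(sic_code):
--     try:
--         sic_code = int(sic_code)  # Ensure SIC code is an integer
--     except ValueError:
--         return 'Other'  # Return 'Other' if SIC code cannot be converted to integer
--
--     # Define SIC code ranges for each industry
--     cnsmr_ranges = [(100, 999), (2000, 2399), (2700, 2749), (2770, 2799), (3100, 3199),
--                     (3940, 3989), (2500, 2519), (2590, 2599), (3630, 3659), (3710, 3711),
--                     (3714, 3714), (3716, 3716), (3750, 3751), (3792, 3792), (3900, 3939),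
--                     (3990, 3999), (5000, 5999), (7200, 7299), (7600, 7699)]
--     manuf_ranges = [(2520, 2589), (2600, 2699), (2750, 2769), (2800, 2829), (2840, 2899),
--                     (3000, 3099), (3200, 3569), (3580, 3621), (3623, 3629), (3700, 3709),
--                     (3712, 3713), (3715, 3715), (3717, 3749), (3752, 3791), (3793, 3799),
--                     (3860, 3899), (1200, 1399), (2900, 2999), (4900, 4949)]
--     hitec_ranges = [(3570, 3579), (3622, 3622), (3660, 3692), (3694, 3699), (3810, 3839),
--                     (7370, 7379), (7391, 7391), (8730, 8734), (4800, 4899)]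
--     hlth_ranges = [(2830, 2839), (3693, 3693), (3840, 3859), (8000, 8099)]
--
--     # Assign industry based on SIC code range
--     for start, end in cnsmr_ranges:
--         if start <= sic_code <= end:
--             return 'Cnsmr'
--     for start, end in manuf_ranges:
--         if start <= sic_code <= end:
--             return 'Manuf'
--     for start, end in hitec_ranges:
--         if start <= sic_code <= end:
--             return 'HiTec'
--     for start, end in hlth_ranges:
--         if start <= sic_code <= end:
--             return 'Hlth'
--
--     return 'Other'  # Default category if no ranges match
-- ===== SOURCE B (Python) =====
-- # The Fama-French 4-way partition written as a step function on SIC codes: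
-- # each entry (t, label) means "from code t (inclusive) up to the next entry's
-- # threshold, the industry is label".  Below 100 and in every gap the label is
-- # the explicit 'Other' entry.  One sorted table, one early-exit scan per call.
-- _STEPS = [
--     (100, 'Cnsmr'), (1000, 'Other'), (1200, 'Manuf'), (1400, 'Other'),
--     (2000, 'Cnsmr'), (2400, 'Other'), (2500, 'Cnsmr'), (2520, 'Manuf'),
--     (2590, 'Cnsmr'), (2600, 'Manuf'), (2700, 'Cnsmr'), (2750, 'Manuf'),
--     (2770, 'Cnsmr'), (2800, 'Manuf'), (2830, 'Hlth'), (2840, 'Manuf'),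
--     (3100, 'Cnsmr'), (3200, 'Manuf'), (3570, 'HiTec'), (3580, 'Manuf'),
--     (3622, 'HiTec'), (3623, 'Manuf'), (3630, 'Cnsmr'), (3660, 'HiTec'),
--     (3693, 'Hlth'), (3694, 'HiTec'), (3700, 'Manuf'), (3710, 'Cnsmr'),
--     (3712, 'Manuf'), (3714, 'Cnsmr'), (3715, 'Manuf'), (3716, 'Cnsmr'),
--     (3717, 'Manuf'), (3750, 'Cnsmr'), (3752, 'Manuf'), (3792, 'Cnsmr'),
--     (3793, 'Manuf'), (3800, 'Other'), (3810, 'HiTec'), (3840, 'Hlth'),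
--     (3860, 'Manuf'), (3900, 'Cnsmr'), (4000, 'Other'), (4800, 'HiTec'),
--     (4900, 'Manuf'), (4950, 'Other'), (5000, 'Cnsmr'), (6000, 'Other'),
--     (7200, 'Cnsmr'), (7300, 'Other'), (7370, 'HiTec'), (7380, 'Other'),
--     (7391, 'HiTec'), (7392, 'Other'), (7600, 'Cnsmr'), (7700, 'Other'),
--     (8000, 'Hlth'), (8100, 'Other'), (8730, 'HiTec'), (8735, 'Other'),
-- ]
--
--
-- def assign_industry(sic_code):
--     try:
--         code = int(sic_code)
--     except ValueError:
--         return 'Other'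
--     label = 'Other'
--     for t, lab in _STEPS:
--         if t > code:
--             break
--         label = lab
--     return label
-- ===== Notes on version B (the rewrite author's own statement) =====
-- stated objective: alternative
-- what changed: Replaces the four priority-ordered linear scans over inclusive (start,end) range pairs by a single sorted step-function table of (threshold,label) breakpoints covering the whole line (gaps carry explicit 'Other' entries), scanned once with an early exit at the first threshold above the code.
import Mathlib
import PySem

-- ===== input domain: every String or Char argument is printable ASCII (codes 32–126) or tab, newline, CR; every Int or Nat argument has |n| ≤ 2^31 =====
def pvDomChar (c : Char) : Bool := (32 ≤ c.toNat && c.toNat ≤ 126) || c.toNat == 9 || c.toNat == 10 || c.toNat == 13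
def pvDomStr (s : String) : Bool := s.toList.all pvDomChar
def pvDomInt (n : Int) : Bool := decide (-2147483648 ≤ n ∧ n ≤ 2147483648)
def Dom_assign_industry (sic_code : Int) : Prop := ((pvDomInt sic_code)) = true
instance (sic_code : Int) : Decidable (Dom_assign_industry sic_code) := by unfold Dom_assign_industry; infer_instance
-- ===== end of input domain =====

-- B replaces A's four priority-ordered scans over 51 inclusive ranges by one sorted
-- step-function table of 60 (threshold, label) breakpoints scanned with an early exit
-- (objective: alternative data structure).  The Lean argument is already an Int, so
-- Python's int() conversion is the identity here.

-- ===== PORT A =====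
-- the four literal range lists of A
def pvCnsmrRanges : List (Int × Int) :=
  [(100, 999), (2000, 2399), (2700, 2749), (2770, 2799), (3100, 3199),
   (3940, 3989), (2500, 2519), (2590, 2599), (3630, 3659), (3710, 3711),
   (3714, 3714), (3716, 3716), (3750, 3751), (3792, 3792), (3900, 3939),
   (3990, 3999), (5000, 5999), (7200, 7299), (7600, 7699)]
def pvManufRanges : List (Int × Int) :=
  [(2520, 2589), (2600, 2699), (2750, 2769), (2800, 2829), (2840, 2899),
   (3000, 3099), (3200, 3569), (3580, 3621), (3623, 3629), (3700, 3709),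
   (3712, 3713), (3715, 3715), (3717, 3749), (3752, 3791), (3793, 3799),
   (3860, 3899), (1200, 1399), (2900, 2999), (4900, 4949)]
def pvHitecRanges : List (Int × Int) :=
  [(3570, 3579), (3622, 3622), (3660, 3692), (3694, 3699), (3810, 3839),
   (7370, 7379), (7391, 7391), (8730, 8734), (4800, 4899)]
def pvHlthRanges : List (Int × Int) :=
  [(2830, 2839), (3693, 3693), (3840, 3859), (8000, 8099)]

-- 'for start, end in ranges: if start <= sic <= end: return …' as a structural scan
def pvInAny (ranges : List (Int × Int)) (sic : Int) : Bool :=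
  match ranges with
  | [] => false
  | (s, e) :: rest => if s ≤ sic ∧ sic ≤ e then true else pvInAny rest sic

def assign_industry (sic_code : Int) : String :=
  if pvInAny pvCnsmrRanges sic_code then "Cnsmr"
  else if pvInAny pvManufRanges sic_code then "Manuf"
  else if pvInAny pvHitecRanges sic_code then "HiTec"
  else if pvInAny pvHlthRanges sic_code then "Hlth"
  else "Other"

-- ===== PORT B =====
-- Source B's hardcoded step-function table: label applies from its threshold up to the next
def pvSteps : List (Int × String) :=
  [(100, "Cnsmr"), (1000, "Other"), (1200, "Manuf"), (1400, "Other"),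
   (2000, "Cnsmr"), (2400, "Other"), (2500, "Cnsmr"), (2520, "Manuf"),
   (2590, "Cnsmr"), (2600, "Manuf"), (2700, "Cnsmr"), (2750, "Manuf"),
   (2770, "Cnsmr"), (2800, "Manuf"), (2830, "Hlth"), (2840, "Manuf"),
   (3100, "Cnsmr"), (3200, "Manuf"), (3570, "HiTec"), (3580, "Manuf"),
   (3622, "HiTec"), (3623, "Manuf"), (3630, "Cnsmr"), (3660, "HiTec"),
   (3693, "Hlth"), (3694, "HiTec"), (3700, "Manuf"), (3710, "Cnsmr"),
   (3712, "Manuf"), (3714, "Cnsmr"), (3715, "Manuf"), (3716, "Cnsmr"),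
   (3717, "Manuf"), (3750, "Cnsmr"), (3752, "Manuf"), (3792, "Cnsmr"),
   (3793, "Manuf"), (3800, "Other"), (3810, "HiTec"), (3840, "Hlth"),
   (3860, "Manuf"), (3900, "Cnsmr"), (4000, "Other"), (4800, "HiTec"),
   (4900, "Manuf"), (4950, "Other"), (5000, "Cnsmr"), (6000, "Other"),
   (7200, "Cnsmr"), (7300, "Other"), (7370, "HiTec"), (7380, "Other"),
   (7391, "HiTec"), (7392, "Other"), (7600, "Cnsmr"), (7700, "Other"),
   (8000, "Hlth"), (8100, "Other"), (8730, "HiTec"), (8735, "Other")]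

-- Source B's loop: 'for t, lab in _STEPS: if t > code: break; label = lab'
def pvStepScan (steps : List (Int × String)) (code : Int) (label : String) : String :=
  match steps with
  | [] => label
  | (t, lab) :: rest => if t > code then label else pvStepScan rest code lab

def assign_industry_alt (sic_code : Int) : String :=
  pvStepScan pvSteps sic_code "Other"

-- ===== PRECONDITION & SPEC =====
def Spec_assign_industry (sic_code : Int) (out : String) : Prop := out = assign_industry_alt sic_code
instance (sic_code : Int) (out : String) : Decidable (Spec_assign_industry sic_code out) := by unfold Spec_assign_industry; infer_instance

-- ===== CLAIM (what is proved, stated in full; the proofs are below) =====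
def Claim_equal_assign_industry : Prop := ∀ (sic_code : Int), Dom_assign_industry sic_code → Spec_assign_industry sic_code (assign_industry sic_code)

-- ===== LEMMAS AND PROOFS =====

-- All boundary values either program ever compares against: every range start and
-- every range end + 1 of A, and every threshold of B's table.
def pvT : List Int :=
  [100, 1000, 1200, 1400, 2000, 2400, 2500, 2520, 2590, 2600, 2700, 2750, 2770,
   2800, 2830, 2840, 2900, 3000, 3100, 3200, 3570, 3580, 3622, 3623, 3630, 3660,
   3693, 3694, 3700, 3710, 3712, 3714, 3715, 3716, 3717, 3750, 3752, 3792, 3793,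
   3800, 3810, 3840, 3860, 3900, 3940, 3990, 4000, 4800, 4900, 4950, 5000, 6000,
   7200, 7300, 7370, 7380, 7391, 7392, 7600, 7700, 8000, 8100, 8730, 8735]

-- two codes with the same comparison profile against pvT
def pvSameProf (x y : Int) : Prop := ∀ t ∈ pvT, (t ≤ x ↔ t ≤ y)

theorem pvT_ge_100 : ∀ t ∈ pvT, (100 : Int) ≤ t := by decide

theorem pvRangesBoundsInT : ∀ l ∈ [pvCnsmrRanges, pvManufRanges, pvHitecRanges, pvHlthRanges],
    ∀ p ∈ l, p.1 ∈ pvT ∧ p.2 + 1 ∈ pvT := by decide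

theorem pvStepsInT : ∀ p ∈ pvSteps, p.1 ∈ pvT := by decide

theorem pvInAny_congr (l : List (Int × Int)) (x y : Int)
    (hb : ∀ p ∈ l, p.1 ∈ pvT ∧ p.2 + 1 ∈ pvT) (h : pvSameProf x y) :
    pvInAny l x = pvInAny l y := by
  induction l with
  | nil => rfl
  | cons hd tl ih =>
    obtain ⟨s, e⟩ := hd
    obtain ⟨hs, he⟩ := hb (s, e) List.mem_cons_self
    have h1 := h s hs
    have h2 := h (e + 1) he
    simp only [pvInAny]
    have : (s ≤ x ∧ x ≤ e) ↔ (s ≤ y ∧ y ≤ e) := by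
      constructor <;> intro hc <;> exact ⟨by omega, by omega⟩
    rw [if_congr this rfl rfl, ih (fun p hp => hb p (List.mem_cons_of_mem _ hp))]

theorem pvA_congr (x y : Int) (h : pvSameProf x y) :
    assign_industry x = assign_industry y := by
  have hc := pvRangesBoundsInT
  simp only [List.mem_cons, List.not_mem_nil, or_false, forall_eq_or_imp, forall_eq] at hc
  unfold assign_industry
  rw [pvInAny_congr _ x y hc.1 h, pvInAny_congr _ x y hc.2.1 h,
      pvInAny_congr _ x y hc.2.2.1 h, pvInAny_congr _ x y hc.2.2.2 h]

theorem pvStepScan_congr (l : List (Int × String)) (x y : Int) (lab : String)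
    (hb : ∀ p ∈ l, p.1 ∈ pvT) (h : pvSameProf x y) :
    pvStepScan l x lab = pvStepScan l y lab := by
  induction l generalizing lab with
  | nil => rfl
  | cons hd tl ih =>
    obtain ⟨t, s⟩ := hd
    have ht := h t (hb (t, s) List.mem_cons_self)
    simp only [pvStepScan]
    have : (t > x) ↔ (t > y) := by omega
    rw [if_congr this rfl rfl]
    split
    · rfl
    · exact ih s (fun p hp => hb p (List.mem_cons_of_mem _ hp))

theorem pvB_congr (x y : Int) (h : pvSameProf x y) :
    assign_industry_alt x = assign_industry_alt y := by
  unfold assign_industry_alt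
  exact pvStepScan_congr pvSteps x y "Other" pvStepsInT h

-- a canonical representative with the same comparison profile: the largest boundary ≤ x,
-- or 99 if there is none
def pvRep (x : Int) : Int :=
  pvT.foldl (fun acc t => if t ≤ x ∧ acc < t then t else acc) 99

theorem pvFold_inv (l : List Int) (x a : Int) :
    (l.foldl (fun acc t => if t ≤ x ∧ acc < t then t else acc) a = a ∨
     (l.foldl (fun acc t => if t ≤ x ∧ acc < t then t else acc) a ≤ x ∧
      l.foldl (fun acc t => if t ≤ x ∧ acc < t then t else acc) a ∈ a :: l)) ∧
    a ≤ l.foldl (fun acc t => if t ≤ x ∧ acc < t then t else acc) a ∧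
    (∀ t ∈ l, t ≤ x → t ≤ l.foldl (fun acc t => if t ≤ x ∧ acc < t then t else acc) a) := by
  induction l generalizing a with
  | nil => exact ⟨Or.inl rfl, le_refl a, by simp⟩
  | cons hd tl ih =>
    simp only [List.foldl_cons]
    by_cases hcond : hd ≤ x ∧ a < hd
    · rw [if_pos hcond]
      obtain ⟨hmem, hle, hmax⟩ := ih hd
      refine ⟨?_, by omega, ?_⟩
      · rcases hmem with heq | ⟨hx, hm⟩
        · exact Or.inr ⟨by omega, by rw [heq]; simp⟩
        · exact Or.inr ⟨hx, List.mem_cons_of_mem a hm⟩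
      · intro t ht htx
        rcases List.mem_cons.1 ht with rfl | ht'
        · omega
        · exact hmax t ht' htx
    · rw [if_neg hcond]
      obtain ⟨hmem, hle, hmax⟩ := ih a
      refine ⟨?_, hle, ?_⟩
      · rcases hmem with heq | ⟨hx, hm⟩
        · exact Or.inl heq
        · refine Or.inr ⟨hx, ?_⟩
          rcases List.mem_cons.1 hm with heq' | hm'
          · rw [heq']; exact List.mem_cons_self
          · exact List.mem_cons_of_mem _ (List.mem_cons_of_mem _ hm')
      · intro t ht htx
        rcases List.mem_cons.1 ht with rfl | ht'
        · omega
        · exact hmax t ht' htx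

theorem pvRep_prof (x : Int) : pvSameProf x (pvRep x) := by
  obtain ⟨hmem, _, hmax⟩ := pvFold_inv pvT x 99
  intro t ht
  constructor
  · intro htx
    exact hmax t ht htx
  · intro htr
    rcases hmem with heq | ⟨hx, _⟩
    · have := pvT_ge_100 t ht
      unfold pvRep at htr; rw [heq] at htr; omega
    · unfold pvRep at htr; omega

theorem pvRep_mem (x : Int) : pvRep x ∈ (99 : Int) :: pvT := by
  obtain ⟨hmem, _, _⟩ := pvFold_inv pvT x 99
  rcases hmem with heq | ⟨_, hm⟩
  · unfold pvRep; rw [heq]; simp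
  · exact hm

-- the two programs agree on every representative (a finite evaluation)
theorem pvAgreeOnReps : ∀ t ∈ (99 : Int) :: pvT, assign_industry t = assign_industry_alt t := by
  decide

-- ===== VERDICT (by name: the statement is the Claim_ definition above) =====
theorem assign_industry_spec : Claim_equal_assign_industry := by
  intro sic _
  unfold Spec_assign_industry
  calc assign_industry sic = assign_industry (pvRep sic) := pvA_congr _ _ (pvRep_prof sic)
    _ = assign_industry_alt (pvRep sic) := pvAgreeOnReps _ (pvRep_mem sic)
    _ = assign_industry_alt sic := (pvB_congr _ _ (pvRep_prof sic)).symm
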